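-- pv_equiv track=rewrite | github.com/heojungeun/codingtestPractice | 42627.py | solutionNo
-- ===== SOURCE A (Python) =====
-- def solutionNo(jobs):
--     import heapq
--     answer = 0
--     prev = 0
--     heap = []
--     for x in jobs:
--         heapq.heappush(heap, (x[1],x[0]))
--     for i in jobs:
--         work = heapq.heappop(heap)
--         answer += work[0] + prev - work[1]
--         prev = work[0] + prev
--     answer //= len(jobs)
--     return answer
-- ===== SOURCE B (Python) =====
-- def solutionNo(jobs):
--     n = len(jobs)
--     pairs = sorted((x[1], x[0]) for x in jobs)
--     total = sum(d * (n - i) for i, (d, r) in enumerate(pairs))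
--     total -= sum(r for _, r in pairs)
--     return total // n
-- ===== Notes on version B (the rewrite author's own statement) =====
-- stated objective: alternative
-- what changed: Replaces the heap push/pop loop with a running prefix sum by a single sort of the (duration, request) pairs and a positional weighted sum (each duration counted n-i times), subtracting all request times and applying the floor division once at the end.
-- outside the precondition, e.g. on solutionNo([]): A raises ZeroDivisionError, B raises ZeroDivisionError; on solutionNo([[3]]): A raises IndexError, B raises IndexError
import Mathlib
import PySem

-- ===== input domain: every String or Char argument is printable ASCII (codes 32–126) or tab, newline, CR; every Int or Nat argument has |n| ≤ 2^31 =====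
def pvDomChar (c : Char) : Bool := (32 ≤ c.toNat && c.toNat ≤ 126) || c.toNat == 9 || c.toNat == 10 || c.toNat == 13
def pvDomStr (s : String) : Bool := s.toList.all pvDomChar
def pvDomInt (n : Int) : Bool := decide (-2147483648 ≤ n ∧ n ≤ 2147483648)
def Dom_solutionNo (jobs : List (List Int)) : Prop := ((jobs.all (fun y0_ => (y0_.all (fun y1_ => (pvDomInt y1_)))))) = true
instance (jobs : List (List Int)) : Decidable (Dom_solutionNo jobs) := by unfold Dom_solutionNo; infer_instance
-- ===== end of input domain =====

-- B replaces A's heap + running prefix-sum loop by one sort and a positional weighted sum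
-- (each duration counted (n - i) times), with the floor division applied once at the end.

-- ===== PORT A =====
-- heapq is a stdlib call; it is ported by its contract on the values A observes: the heap
-- is the multiset of pushed tuples, heappush adds, heappop removes the first minimal tuple
-- under Python's lexicographic tuple order.  Exact for A's result: equal tuples are
-- identical, so the popped VALUE sequence is exactly what CPython's binary heap yields.
def pvLexLe (a b : Int × Int) : Bool := a.1 < b.1 || (a.1 == b.1 && a.2 ≤ b.2)

def pvPopMin : List (Int × Int) → Option ((Int × Int) × List (Int × Int))
  | [] => none
  | x :: xs =>
    match pvPopMin xs with
    | none => some (x, [])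
    | some (m, r) => if pvLexLe x m then some (x, xs) else some (m, x :: r)

def heappush (h : List (Int × Int)) (x : Int × Int) : List (Int × Int) := h ++ [x]

def heappop (h : List (Int × Int)) : (Int × Int) × List (Int × Int) :=
  (pvPopMin h).getD ((0, 0), [])

-- x[1], x[0] on a sublist of length ≥ 2 (Pre_ excludes shorter ones, where Python raises)
def pvPair (x : List Int) : Int × Int := (PySem.List.pyGetD x 1 0, PySem.List.pyGetD x 0 0)

def solutionNo (jobs : List (List Int)) : Int :=
  PySem.Int.floordiv
    (jobs.foldl
      (fun (s : Int × Int × List (Int × Int)) _ =>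
        -- work = heappop(heap); answer += work[0] + prev - work[1]; prev = work[0] + prev
        (s.1 + (heappop s.2.2).1.1 + s.2.1 - (heappop s.2.2).1.2,
         (heappop s.2.2).1.1 + s.2.1, (heappop s.2.2).2))
      (0, 0, jobs.foldl (fun h x => heappush h (pvPair x)) [])).1
    (jobs.length : Int)

-- ===== PORT B =====
def pvSortedPairs (jobs : List (List Int)) : List (Int × Int) :=
  PySem.List.sorted (jobs.map pvPair) (fun p => toLex p) false

def solutionNo_alt (jobs : List (List Int)) : Int :=
  PySem.Int.floordiv
    (((PySem.List.enumerate (pvSortedPairs jobs) 0).map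
        (fun ip => ip.2.1 * ((jobs.length : Int) - ip.1))).sum
      - ((pvSortedPairs jobs).map (fun p => p.2)).sum)
    (jobs.length : Int)

-- ===== PRECONDITION & SPEC =====
-- Pre_ = exactly where the Python A returns: jobs ≠ [] (else ZeroDivisionError at the final
-- //=) and every job has at least two entries (else x[1] raises IndexError).
def Pre_solutionNo (jobs : List (List Int)) : Prop :=
  jobs ≠ [] ∧ ∀ x ∈ jobs, 2 ≤ x.length
instance (jobs : List (List Int)) : Decidable (Pre_solutionNo jobs) := by
  unfold Pre_solutionNo; infer_instance

def pvWitness_solutionNo : List (List Int) := [[0, 3], [1, 9], [2, 6]]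

def Spec_solutionNo (jobs : List (List Int)) (out : Int) : Prop := out = solutionNo_alt jobs
instance (jobs : List (List Int)) (out : Int) : Decidable (Spec_solutionNo jobs out) := by
  unfold Spec_solutionNo; infer_instance

-- ===== CLAIM (what is proved, stated in full; the proofs are below) =====
def Claim_equal_solutionNo : Prop := ∀ (jobs : List (List Int)), Dom_solutionNo jobs → Pre_solutionNo jobs → Spec_solutionNo jobs (solutionNo jobs)

-- ===== LEMMAS AND PROOFS =====

theorem pvLexLe_iff (a b : Int × Int) :
    pvLexLe a b = true ↔ (toLex a : Lex (Int × Int)) ≤ toLex b := by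
  simp [pvLexLe, Prod.Lex.le_iff]

theorem pvPopMin_eq_none_iff (l : List (Int × Int)) : pvPopMin l = none ↔ l = [] := by
  cases l with
  | nil => simp [pvPopMin]
  | cons x xs =>
    simp only [pvPopMin]
    cases h : pvPopMin xs with
    | none => simp
    | some p =>
      obtain ⟨m, r⟩ := p
      by_cases hle : pvLexLe x m <;> simp [hle]

theorem pvPopMin_spec (l : List (Int × Int)) (m : Int × Int) (r : List (Int × Int))
    (h : pvPopMin l = some (m, r)) :
    (m :: r).Perm l ∧ ∀ y ∈ l, (toLex m : Lex (Int × Int)) ≤ toLex y := by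
  induction l generalizing m r with
  | nil => simp [pvPopMin] at h
  | cons x xs ih =>
    simp only [pvPopMin] at h
    cases hx : pvPopMin xs with
    | none =>
      rw [hx] at h
      rw [pvPopMin_eq_none_iff] at hx
      subst hx
      simp at h
      obtain ⟨hm, hr⟩ := h
      subst hm; subst hr
      exact ⟨List.Perm.refl _, by simp⟩
    | some p =>
      obtain ⟨m', r'⟩ := p
      rw [hx] at h
      obtain ⟨hperm', hmin'⟩ := ih m' r' hx
      by_cases hle : pvLexLe x m'
      · simp [hle] at h
        obtain ⟨hm, hr⟩ := h
        subst hm; subst hr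
        refine ⟨List.Perm.refl _, ?_⟩
        intro y hy
        rcases List.mem_cons.mp hy with hy | hy
        · subst hy; exact le_refl _
        · exact le_trans ((pvLexLe_iff _ _).mp hle) (hmin' y hy)
      · simp [hle] at h
        obtain ⟨hm, hr⟩ := h
        subst hm; subst hr
        constructor
        · exact (List.Perm.swap x _ _).trans (hperm'.cons x)
        · intro y hy
          rcases List.mem_cons.mp hy with hy | hy
          · subst hy
            exact le_of_not_ge fun hc => hle ((pvLexLe_iff _ _).mpr hc)
          · exact hmin' y hy

theorem pvPopMin_length (l : List (Int × Int)) (m : Int × Int) (r : List (Int × Int))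
    (h : pvPopMin l = some (m, r)) : r.length + 1 = l.length := by
  have := (pvPopMin_spec l m r h).1.length_eq
  simpa using this

-- the value sequence popped from the heap
def pvDrain (l : List (Int × Int)) : List (Int × Int) :=
  match h : pvPopMin l with
  | none => []
  | some (m, r) => m :: pvDrain r
termination_by l.length
decreasing_by
  have := pvPopMin_length l m r h
  omega

theorem pvDrain_nil : pvDrain [] = [] := by
  rw [pvDrain.eq_def]; simp [pvPopMin]

theorem pvDrain_of_popMin (l : List (Int × Int)) (m : Int × Int) (r : List (Int × Int))
    (h : pvPopMin l = some (m, r)) : pvDrain l = m :: pvDrain r := by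
  rw [pvDrain.eq_def]
  split
  · next h' => rw [h'] at h; cases h
  · next m' r' h' => rw [h'] at h; cases h; rfl

theorem pvDrain_perm (l : List (Int × Int)) : (pvDrain l).Perm l := by
  induction l using pvDrain.induct with
  | case1 l h => rw [pvPopMin_eq_none_iff] at h; subst h; rw [pvDrain_nil]
  | case2 l m r h ih =>
    rw [pvDrain_of_popMin l m r h]
    exact (ih.cons m).trans (pvPopMin_spec l m r h).1

theorem pvDrain_pairwise (l : List (Int × Int)) :
    (pvDrain l).Pairwise (fun a b => (toLex a : Lex (Int × Int)) ≤ toLex b) := by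
  induction l using pvDrain.induct with
  | case1 l h => rw [pvPopMin_eq_none_iff] at h; subst h; rw [pvDrain_nil]; exact List.Pairwise.nil
  | case2 l m r h ih =>
    rw [pvDrain_of_popMin l m r h]
    obtain ⟨hperm, hmin⟩ := pvPopMin_spec l m r h
    refine List.Pairwise.cons ?_ ih
    intro y hy
    have hyr : y ∈ r := ((pvDrain_perm r).mem_iff).mp hy
    exact hmin y (hperm.mem_iff.mp (List.mem_cons_of_mem m hyr))

theorem pvDrain_eq_sorted (l : List (Int × Int)) :
    pvDrain l = PySem.List.sorted l (fun p => toLex p) false := by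
  refine PySem.List.eq_of_perm_of_pairwise_le_of_injective (fun p => (toLex p : Lex (Int × Int)))
    (fun a b hab => toLex.injective hab)
    ((pvDrain_perm l).trans (PySem.List.sorted_perm l _ false).symm)
    (pvDrain_pairwise l) (PySem.List.sorted_pairwise l _)

-- the positional weighted sum B computes, with an explicit weight base c
def pvW (w : List (Int × Int)) (c : Int) : Int :=
  ((PySem.List.enumerate w 0).map (fun ip => ip.2.1 * (c - ip.1))).sum
    - (w.map (fun p => p.2)).sum

theorem pvEnumShift (w : List (Int × Int)) : ∀ (c s : Int),
    ((PySem.List.enumerate w (s + 1)).map (fun ip => ip.2.1 * (c - ip.1))).sum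
      = ((PySem.List.enumerate w s).map (fun ip => ip.2.1 * (c - 1 - ip.1))).sum := by
  induction w with
  | nil => intro c s; simp [PySem.List.enumerate_nil]
  | cons x t ih =>
    intro c s
    simp only [PySem.List.enumerate_cons, List.map_cons, List.sum_cons]
    rw [ih c (s + 1)]
    have hx : x.1 * (c - (s + 1)) = x.1 * (c - 1 - s) := by ring
    rw [hx]

theorem pvW_cons (m : Int × Int) (w : List (Int × Int)) (c : Int) :
    pvW (m :: w) c = m.1 * c - m.2 + pvW w (c - 1) := by
  simp only [pvW, PySem.List.enumerate_cons, List.map_cons, List.sum_cons]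
  rw [pvEnumShift w c 0]
  ring_nf

-- A's loop body, as a state transformer (the element of jobs is ignored)
def pvStep (s : Int × Int × List (Int × Int)) : Int × Int × List (Int × Int) :=
  ((s.1 + (heappop s.2.2).1.1 + s.2.1 - (heappop s.2.2).1.2,
    (heappop s.2.2).1.1 + s.2.1, (heappop s.2.2).2))

theorem pvFoldl_const {α : Type} (l : List α)
    (g : Int × Int × List (Int × Int) → Int × Int × List (Int × Int))
    (init : Int × Int × List (Int × Int)) :
    l.foldl (fun s _ => g s) init = g^[l.length] init := by
  induction l generalizing init with
  | nil => simp
  | cons x t ih => simp [List.foldl_cons, ih, Function.iterate_succ_apply]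

theorem pvLoop_eq (n : Nat) : ∀ (l : List (Int × Int)) (ans prev : Int), n = l.length →
    (pvStep^[n] (ans, prev, l)).1 = ans + pvW (pvDrain l) l.length + prev * l.length := by
  induction n with
  | zero =>
    intro l ans prev h
    have : l = [] := by cases l <;> simp_all
    subst this
    rw [pvDrain_nil]
    simp [pvW, PySem.List.enumerate_nil]
  | succ k ih =>
    intro l ans prev h
    cases hpm : pvPopMin l with
    | none => rw [pvPopMin_eq_none_iff] at hpm; subst hpm; simp at h
    | some p =>
      obtain ⟨m, r⟩ := p
      have hlen : r.length + 1 = l.length := pvPopMin_length l m r hpm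
      rw [Function.iterate_succ_apply]
      have hstep : pvStep (ans, prev, l) = (ans + m.1 + prev - m.2, m.1 + prev, r) := by
        simp [pvStep, heappop, hpm]
      rw [hstep, ih r _ _ (by omega)]
      rw [pvDrain_of_popMin l m r hpm, pvW_cons]
      have hc : (l.length : Int) = (r.length : Int) + 1 := by exact_mod_cast hlen.symm
      rw [hc]
      ring_nf

theorem solutionNo_eq (jobs : List (List Int)) : solutionNo jobs = solutionNo_alt jobs := by
  unfold solutionNo solutionNo_alt
  have hheap : jobs.foldl (fun h x => heappush h (pvPair x)) [] = jobs.map pvPair := by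
    simpa [heappush] using PySem.List.foldl_append_singleton_eq_map pvPair jobs ([] : List (Int × Int))
  have hfold : jobs.foldl
      (fun (s : Int × Int × List (Int × Int)) _ =>
        ((s.1 + (heappop s.2.2).1.1 + s.2.1 - (heappop s.2.2).1.2,
          (heappop s.2.2).1.1 + s.2.1, (heappop s.2.2).2)))
      (0, 0, jobs.map pvPair)
      = pvStep^[jobs.length] (0, 0, jobs.map pvPair) :=
    pvFoldl_const jobs pvStep (0, 0, jobs.map pvPair)
  rw [hheap, hfold, pvLoop_eq jobs.length (jobs.map pvPair) 0 0 (by simp),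
    pvDrain_eq_sorted]
  simp only [List.length_map, pvW, pvSortedPairs]
  congr 1
  ring

-- ===== VERDICT (by name: the statement is the Claim_ definition above) =====
theorem solutionNo_spec : Claim_equal_solutionNo := by
  intro jobs _ _
  unfold Spec_solutionNo
  exact solutionNo_eq jobs
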